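-- pv_equiv track=rewrite | github.com/Ech0Potato/PDF_VIDEO_OCR | chineseOCR.py | is_vertical_word
-- ===== SOURCE A (Python) =====
-- def is_vertical_word(sorted_final_boxes):
--     total_num = 0
--     vertical_num = 0
--     for sorted_final_box in sorted_final_boxes:
--         total_num += 1
--         if((sorted_final_box[4] - sorted_final_box[2]) > (sorted_final_box[3] - sorted_final_box[1])):
--             vertical_num += 1
--     if(vertical_num > int(total_num / 2)):
--         return True
--     else:
--         return False
-- ===== SOURCE B (Python) =====
-- def is_vertical_word(sorted_final_boxes):
--     # Majority test via order statistics: sort the per-box orientation flags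
--     # (False = horizontal, True = vertical) and read the lower-median position.
--     # A strict majority of the boxes is vertical iff that position holds True.
--     flags = sorted((b[4] - b[2]) > (b[3] - b[1]) for b in sorted_final_boxes)
--     if not flags:
--         return False
--     return flags[(len(flags) - 1) // 2]
-- ===== Notes on version B (the rewrite author's own statement) =====
-- stated objective: alternative
-- what changed: Instead of tallying counters in a loop and comparing against int(total/2), B computes the majority by order statistics: it sorts the per-box orientation flags and returns the flag at the lower-median position.
import Mathlib
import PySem

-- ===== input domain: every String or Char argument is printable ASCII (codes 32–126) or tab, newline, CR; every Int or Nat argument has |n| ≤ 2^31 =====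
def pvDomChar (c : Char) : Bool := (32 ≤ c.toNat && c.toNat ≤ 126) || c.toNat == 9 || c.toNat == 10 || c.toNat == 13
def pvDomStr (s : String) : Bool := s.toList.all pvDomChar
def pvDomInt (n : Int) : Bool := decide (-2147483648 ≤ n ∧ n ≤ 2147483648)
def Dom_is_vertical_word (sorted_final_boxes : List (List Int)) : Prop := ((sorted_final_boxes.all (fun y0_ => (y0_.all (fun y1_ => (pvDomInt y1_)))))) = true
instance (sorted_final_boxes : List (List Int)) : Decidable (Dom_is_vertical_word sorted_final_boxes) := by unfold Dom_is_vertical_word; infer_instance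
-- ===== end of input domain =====

-- B replaces the tally-and-compare loop by order statistics: sort the orientation flags and read the lower-median position (alternative algorithm, O(n log n) vs O(n)).


-- ===== PORT A =====
-- boxes admitted by Pre_ have ≥ 5 entries, so pyGetD's default 0 is never read
def is_vertical_word (sorted_final_boxes : List (List Int)) : Bool :=
  let s := sorted_final_boxes.foldl
    (fun (st : Int × Int) b =>
      let total := st.1 + 1
      let vertical :=
        if (PySem.List.pyGetD b 4 0 - PySem.List.pyGetD b 2 0) > (PySem.List.pyGetD b 3 0 - PySem.List.pyGetD b 1 0) then st.2 + 1 else st.2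
      (total, vertical))
    (0, 0)
  if s.2 > s.1 / 2 then true else false

-- ===== PORT B =====
-- the median index (len-1)//2 is in range for a nonempty list, so pyGetD's default false is never read
def is_vertical_word_alt (sorted_final_boxes : List (List Int)) : Bool :=
  let flags := PySem.List.sorted
    (sorted_final_boxes.map
      (fun b => decide ((PySem.List.pyGetD b 4 0 - PySem.List.pyGetD b 2 0) > (PySem.List.pyGetD b 3 0 - PySem.List.pyGetD b 1 0))))
    (fun x => x) false
  if flags.isEmpty then false
  else PySem.List.pyGetD flags (PySem.Int.floordiv ((flags.length : Int) - 1) 2) false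

-- ===== PRECONDITION & SPEC =====
-- Pre_ excludes boxes with fewer than 5 coordinates, on which the Python A raises IndexError.
def Pre_is_vertical_word (sorted_final_boxes : List (List Int)) : Prop :=
  ∀ b ∈ sorted_final_boxes, 5 ≤ b.length
instance (sorted_final_boxes : List (List Int)) : Decidable (Pre_is_vertical_word sorted_final_boxes) := by unfold Pre_is_vertical_word; infer_instance
def pvWitness_is_vertical_word : List (List Int) := [[0, 1, 2, 3, 4], [5, 0, 0, 9, 1]]

def Spec_is_vertical_word (sorted_final_boxes : List (List Int)) (out : Bool) : Prop := out = is_vertical_word_alt sorted_final_boxes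
instance (sorted_final_boxes : List (List Int)) (out : Bool) : Decidable (Spec_is_vertical_word sorted_final_boxes out) := by unfold Spec_is_vertical_word; infer_instance

-- ===== CLAIM (what is proved, stated in full; the proofs are below) =====
def Claim_equal_is_vertical_word : Prop := ∀ (sorted_final_boxes : List (List Int)), Dom_is_vertical_word sorted_final_boxes → Pre_is_vertical_word sorted_final_boxes → Spec_is_vertical_word sorted_final_boxes (is_vertical_word sorted_final_boxes)

-- ===== LEMMAS AND PROOFS =====

-- a Bool list's false-count and true-count sum to its length
theorem count_false_add_count_true (l : List Bool) : l.count false + l.count true = l.length := by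
  induction l with
  | nil => simp
  | cons b t ih => cases b <;> simp <;> omega

-- A's fold tallies the length and the number of boxes satisfying p
theorem ivw_foldl (p : List Int → Prop) [DecidablePred p] :
    ∀ (xs : List (List Int)) (t v : Int),
      xs.foldl (fun (st : Int × Int) b => (st.1 + 1, if p b then st.2 + 1 else st.2)) (t, v)
        = (t + xs.length, v + (xs.countP (fun b => decide (p b)) : Int)) := by
  intro xs
  induction xs with
  | nil => intro t v; simp
  | cons x xs ih =>
    intro t v
    simp only [List.foldl_cons, List.countP_cons]
    by_cases h : p x
    · simp [h, ih]; constructor <;> ring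
    · simp [h, ih]; ring_nf

-- any Bool list is a permutation of its falses followed by its trues
theorem bools_perm (l : List Bool) :
    (List.replicate (l.count false) false ++ List.replicate (l.count true) true).Perm l := by
  induction l with
  | nil => simp
  | cons b t ih =>
    cases b
    · simpa [List.count_cons, List.replicate_succ] using ih.cons false
    · simp only [List.count_cons, beq_self_eq_true]
      have h1 : (List.replicate (t.count false) false ++ List.replicate (t.count true + 1) true).Perm
          (true :: (List.replicate (t.count false) false ++ List.replicate (t.count true) true)) := by
        simpa [List.replicate_succ] using
          (List.perm_middle (a := true) (l₁ := List.replicate (t.count false) false)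
            (l₂ := List.replicate (t.count true) true))
      simp [List.count_cons]
      exact h1.trans (ih.cons true)

-- sorting a Bool list yields its falses followed by its trues
theorem sorted_bools (l : List Bool) :
    PySem.List.sorted l (fun x => x) false
      = List.replicate (l.count false) false ++ List.replicate (l.count true) true := by
  refine PySem.List.sorted_id_eq_of_perm_of_pairwise l _ (bools_perm l) ?_
  refine List.pairwise_append.2 ⟨List.pairwise_replicate.2 (Or.inr (le_refl false)),
    List.pairwise_replicate.2 (Or.inr (le_refl true)), ?_⟩
  intro a ha b hb
  rw [List.eq_of_mem_replicate ha, List.eq_of_mem_replicate hb]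
  exact Bool.false_le true

-- reading position j of "cf falses then ct trues" tests cf ≤ j
theorem getD_repl (cf ct j : Nat) (hj : j < cf + ct) :
    (List.replicate cf false ++ List.replicate ct true).getD j false = decide (cf ≤ j) := by
  by_cases h : j < cf
  · rw [List.getD_eq_getElem?_getD, List.getElem?_append_left (by simpa)]
    simp [h, Nat.not_le.2 h]
  · have h' : cf ≤ j := Nat.le_of_not_lt h
    rw [List.getD_eq_getElem?_getD, List.getElem?_append_right (by simpa using h')]
    have : j - cf < ct := by omega
    simp [this, h']

-- ===== VERDICT (by name: the statement is the Claim_ definition above) =====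
theorem is_vertical_word_spec : Claim_equal_is_vertical_word := by
  intro xs _ _
  unfold Spec_is_vertical_word is_vertical_word is_vertical_word_alt
  rw [ivw_foldl (fun b => (PySem.List.pyGetD b 4 0 - PySem.List.pyGetD b 2 0) > (PySem.List.pyGetD b 3 0 - PySem.List.pyGetD b 1 0)) xs 0 0]
  simp only [sorted_bools, zero_add]
  set p : List Int → Bool := fun b =>
    decide ((PySem.List.pyGetD b 4 0 - PySem.List.pyGetD b 2 0) > (PySem.List.pyGetD b 3 0 - PySem.List.pyGetD b 1 0)) with hp
  set n := xs.length with hn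
  set v := (xs.map p).count true with hv
  set f := (xs.map p).count false with hf
  have hcount : xs.countP (fun b => decide ((PySem.List.pyGetD b 4 0 - PySem.List.pyGetD b 2 0) > (PySem.List.pyGetD b 3 0 - PySem.List.pyGetD b 1 0))) = v := by
    have hcomp : ((fun x => x == true) ∘ p) = p := by
      funext b; cases hpb : p b <;> simp [Function.comp, hpb]
    rw [hv, List.count_eq_countP, List.countP_map, hcomp]
  have hfv : f + v = n := by
    rw [hf, hv, hn, ← List.length_map (f := p)]
    exact count_false_add_count_true (xs.map p)
  rw [hcount]
  by_cases hnil : xs = []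
  · subst hnil; simp at hv hf; simp [hv, hf]
  · have hn1 : 1 ≤ n := by
      rw [hn]; exact List.length_pos_iff.2 hnil
    have hlen : (List.replicate f false ++ List.replicate v true).length = n := by
      simp [hfv]
    have hne : ¬ (List.replicate f false ++ List.replicate v true).isEmpty = true := by
      simp [List.isEmpty_iff, List.append_eq_nil_iff, List.replicate_eq_nil_iff]
      omega
    rw [if_neg hne, hlen]
    have hfd : PySem.Int.floordiv ((n : Int) - 1) 2 = (((n - 1) / 2 : Nat) : Int) := by
      rw [PySem.Int.floordiv_eq_ediv_of_pos (by omega)]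
      omega
    rw [hfd, PySem.List.pyGetD_natCast, getD_repl f v ((n - 1) / 2) (by omega)]
    by_cases hA : (v : Int) > (n : Int) / 2
    · rw [if_pos hA]
      have : f ≤ (n - 1) / 2 := by omega
      simp [this]
    · rw [if_neg hA]
      have : ¬ f ≤ (n - 1) / 2 := by omega
      simp [this]
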